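-- pv_equiv track=rewrite | github.com/xjtulyc/MedgeClaw | skills/clawbio/genome-compare/genome_compare.py | _ibs_at_site
-- ===== SOURCE A (Python) =====
-- def _ibs_at_site(geno_a: str, geno_b: str) -> int:
--     """Compute IBS (0, 1, or 2) between two diploid genotype calls.
--
--     Handles haploid calls on X/Y/MT (single character).
--     """
--     if len(geno_a) == 1 and len(geno_b) == 1:
--         return 2 if geno_a == geno_b else 0
--     if len(geno_a) < 2 or len(geno_b) < 2:
--         return 0
--
--     a_alleles = list(geno_a[:2])
--     b_alleles = list(geno_b[:2])
--
--     # Multiset matching: count shared alleles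
--     remaining = list(a_alleles)
--     match_count = 0
--     for b in b_alleles:
--         if b in remaining:
--             remaining.remove(b)
--             match_count += 1
--     return match_count
-- ===== SOURCE B (Python) =====
-- def _ibs_at_site(geno_a: str, geno_b: str) -> int:
--     if len(geno_a) == 1 and len(geno_b) == 1:
--         return 2 if geno_a == geno_b else 0
--     if len(geno_a) < 2 or len(geno_b) < 2:
--         return 0
--     a2 = geno_a[:2]
--     b2 = geno_b[:2]
--     if sorted(a2) == sorted(b2):
--         return 2
--     return 1 if set(a2) & set(b2) else 0
-- ===== Notes on version B (the rewrite author's own statement) =====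
-- stated objective: simpler
-- what changed: Replaced the iterative multiset-matching loop (remaining list + remove) with a closed-form case analysis: 2 if the sorted allele pairs are equal, 1 if the allele sets intersect, else 0.
import Mathlib
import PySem

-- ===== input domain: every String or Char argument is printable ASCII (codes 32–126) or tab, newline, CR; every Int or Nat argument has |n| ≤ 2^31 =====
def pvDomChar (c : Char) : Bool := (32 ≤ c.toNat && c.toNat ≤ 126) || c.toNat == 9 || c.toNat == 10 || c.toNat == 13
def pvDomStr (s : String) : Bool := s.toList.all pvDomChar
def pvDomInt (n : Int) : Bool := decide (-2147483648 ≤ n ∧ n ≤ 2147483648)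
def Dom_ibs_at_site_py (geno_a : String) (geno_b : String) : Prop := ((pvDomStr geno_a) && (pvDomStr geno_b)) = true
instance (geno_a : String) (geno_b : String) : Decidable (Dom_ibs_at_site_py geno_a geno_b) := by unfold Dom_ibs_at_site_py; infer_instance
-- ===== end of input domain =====

-- B replaces A's multiset-matching removal loop with a closed-form case analysis (sorted-pair equality, then set intersection); objective: simpler.


-- ===== PORT A =====
-- Port of A: guards, then the multiset-matching loop over b's two alleles.
def ibs_at_site_py (geno_a : String) (geno_b : String) : Int :=
  if geno_a.toList.length = 1 ∧ geno_b.toList.length = 1 then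
    (if geno_a = geno_b then 2 else 0)
  else if geno_a.toList.length < 2 ∨ geno_b.toList.length < 2 then 0
  else
    let a_alleles := PySem.List.slice geno_a.toList none (some 2)
    let b_alleles := PySem.List.slice geno_b.toList none (some 2)
    -- for b in b_alleles: if b in remaining: remaining.remove(b); match_count += 1
    let st := b_alleles.foldl (fun (s : List Char × Int) b =>
      if b ∈ s.1 then ((PySem.List.remove? s.1 b).getD s.1, s.2 + 1) else s)
      (a_alleles, 0)
    st.2

-- ===== PORT B =====
-- B: same guards, then closed-form: 2 if sorted pairs equal, 1 if allele sets meet, else 0.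
def ibs_at_site_py_alt (geno_a : String) (geno_b : String) : Int :=
  if geno_a.toList.length = 1 ∧ geno_b.toList.length = 1 then
    (if geno_a = geno_b then 2 else 0)
  else if geno_a.toList.length < 2 ∨ geno_b.toList.length < 2 then 0
  else
    let a2 := PySem.List.slice geno_a.toList none (some 2)
    let b2 := PySem.List.slice geno_b.toList none (some 2)
    if PySem.List.sorted a2 (fun x => x) false = PySem.List.sorted b2 (fun x => x) false then 2
    -- set(a2) & set(b2) truthiness: the intersection of the two allele sets is nonempty
    else if (PySem.Set.ofList a2).filter (fun c => decide (c ∈ PySem.Set.ofList b2)) ≠ [] then 1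
    else 0

-- ===== PRECONDITION & SPEC =====
def Spec_ibs_at_site_py (geno_a : String) (geno_b : String) (out : Int) : Prop := out = ibs_at_site_py_alt geno_a geno_b
instance (geno_a : String) (geno_b : String) (out : Int) : Decidable (Spec_ibs_at_site_py geno_a geno_b out) := by unfold Spec_ibs_at_site_py; infer_instance

-- ===== CLAIM (what is proved, stated in full; the proofs are below) =====
def Claim_equal_ibs_at_site_py : Prop := ∀ (geno_a : String) (geno_b : String), Dom_ibs_at_site_py geno_a geno_b → Spec_ibs_at_site_py geno_a geno_b (ibs_at_site_py geno_a geno_b)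

-- ===== LEMMAS AND PROOFS =====

-- [a0,a1] is a permutation of [b0,b1] iff the pairs match directly or crosswise.
lemma pair_perm_iff (a0 a1 b0 b1 : Char) :
    [a0, a1].Perm [b0, b1] ↔ ((a0 = b0 ∧ a1 = b1) ∨ (a0 = b1 ∧ a1 = b0)) := by
  constructor
  · intro h
    have ha : a0 ∈ [b0, b1] := h.mem_iff.mp (by simp)
    simp at ha
    rcases ha with rfl | rfl
    · have := h.cons_inv
      simp [List.perm_singleton] at this
      exact Or.inl ⟨rfl, this⟩
    · have h2 : [a0, a1].Perm [a0, b0] := h.trans (List.Perm.swap ..)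
      have := h2.cons_inv
      simp [List.perm_singleton] at this
      exact Or.inr ⟨rfl, this⟩
  · rintro (⟨rfl, rfl⟩ | ⟨rfl, rfl⟩)
    · exact .refl _
    · exact .swap ..

-- A's matching loop on allele pairs, characterised as a closed form over equalities.
lemma loop_key (a0 a1 b0 b1 : Char) :
    ([b0, b1].foldl (fun (s : List Char × Int) b =>
      if b ∈ s.1 then ((PySem.List.remove? s.1 b).getD s.1, s.2 + 1) else s)
      ([a0, a1], 0)).2
    = (if (a0 = b0 ∧ a1 = b1) ∨ (a0 = b1 ∧ a1 = b0) then (2 : Int)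
       else if a0 = b0 ∨ a0 = b1 ∨ a1 = b0 ∨ a1 = b1 then 1 else 0) := by
  simp only [List.foldl_cons, List.foldl_nil]
  by_cases h1 : b0 = a0
  · subst h1
    rw [if_pos (by simp : b0 ∈ [b0, a1]), PySem.List.remove?_cons_self]
    simp only [Option.getD_some]
    by_cases h2 : b1 = a1
    · subst h2
      simp
    · have h2' : ¬ a1 = b1 := fun h => h2 h.symm
      rw [if_neg (by simp [h2] : ¬ b1 ∈ [a1])]
      split_ifs with hI <;> simp_all
  · have h1' : ¬ a0 = b0 := fun h => h1 h.symm
    by_cases h2 : b0 = a1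
    · subst h2
      rw [if_pos (by simp : b0 ∈ [a0, b0]),
        PySem.List.remove?_cons_of_ne _ h1', PySem.List.remove?_cons_self]
      simp only [Option.map_some, Option.getD_some]
      by_cases h3 : b1 = a0
      · subst h3
        simp
      · have h3' : ¬ a0 = b1 := fun h => h3 h.symm
        rw [if_neg (by simp [h3] : ¬ b1 ∈ [a0])]
        split_ifs with hI <;> simp_all
    · have h2' : ¬ a1 = b0 := fun h => h2 h.symm
      rw [if_neg (by simp [h1, h2] : ¬ b0 ∈ [a0, a1])]
      by_cases h3 : b1 = a0
      · subst h3
        rw [if_pos (by simp : b1 ∈ [b1, a1]), PySem.List.remove?_cons_self]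
        split_ifs with hI hJ <;> simp_all
      · have h3' : ¬ a0 = b1 := fun h => h3 h.symm
        by_cases h4 : b1 = a1
        · subst h4
          rw [if_pos (by simp : b1 ∈ [a0, b1]),
            PySem.List.remove?_cons_of_ne _ h3', PySem.List.remove?_cons_self]
          split_ifs with hI hJ <;> simp_all
        · have h4' : ¬ a1 = b1 := fun h => h4 h.symm
          rw [if_neg (by simp [h3, h4] : ¬ b1 ∈ [a0, a1])]
          split_ifs with hI hJ <;> simp_all

-- B's two closed-form tests, rewritten to the same equality conditions as loop_key.
lemma ibs_core (a0 a1 b0 b1 : Char) :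
    ([b0, b1].foldl (fun (s : List Char × Int) b =>
      if b ∈ s.1 then ((PySem.List.remove? s.1 b).getD s.1, s.2 + 1) else s)
      ([a0, a1], 0)).2
    =
    (if PySem.List.sorted [a0, a1] (fun x => x) false = PySem.List.sorted [b0, b1] (fun x => x) false then (2 : Int)
     else if (PySem.Set.ofList [a0, a1]).filter (fun c => decide (c ∈ PySem.Set.ofList [b0, b1])) ≠ [] then 1
     else 0) := by
  have hs : (PySem.List.sorted [a0, a1] (fun x => x) false = PySem.List.sorted [b0, b1] (fun x => x) false)
      ↔ ((a0 = b0 ∧ a1 = b1) ∨ (a0 = b1 ∧ a1 = b0)) := by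
    rw [PySem.List.sorted_id_eq_sorted_id_iff_perm]; exact pair_perm_iff a0 a1 b0 b1
  have hf : ((PySem.Set.ofList [a0, a1]).filter (fun c => decide (c ∈ PySem.Set.ofList [b0, b1])) ≠ [])
      ↔ (a0 = b0 ∨ a0 = b1 ∨ a1 = b0 ∨ a1 = b1) := by
    simp [ne_eq, List.filter_eq_nil_iff, PySem.Set.mem_ofList]
    tauto
  rw [loop_key]
  simp only [hs, hf]

-- ===== VERDICT (by name: the statement is the Claim_ definition above) =====
theorem ibs_at_site_py_spec : Claim_equal_ibs_at_site_py := by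
  intro ga gb _
  unfold Spec_ibs_at_site_py ibs_at_site_py ibs_at_site_py_alt
  by_cases hg : ga.toList.length = 1 ∧ gb.toList.length = 1
  · rw [if_pos hg, if_pos hg]
  · rw [if_neg hg, if_neg hg]
    by_cases hlt : ga.toList.length < 2 ∨ gb.toList.length < 2
    · rw [if_pos hlt, if_pos hlt]
    · rw [if_neg hlt, if_neg hlt]
      push Not at hlt
      obtain ⟨ha, hb⟩ := hlt
      rcases hA : ga.toList with _ | ⟨a0, _ | ⟨a1, ar⟩⟩
      · rw [hA] at ha; simp at ha
      · rw [hA] at ha; simp at ha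
      · rcases hB : gb.toList with _ | ⟨b0, _ | ⟨b1, br⟩⟩
        · rw [hB] at hb; simp at hb
        · rw [hB] at hb; simp at hb
        · have h2 : PySem.List.slice (a0 :: a1 :: ar) none (some 2) = [a0, a1] := by
            simp [PySem.List.slice_to, List.take]
          have h2' : PySem.List.slice (b0 :: b1 :: br) none (some 2) = [b0, b1] := by
            simp [PySem.List.slice_to, List.take]
          simp only [h2, h2']
          exact ibs_core a0 a1 b0 b1
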